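-- pv_equiv track=rewrite | github.com/mengyx-work/CS_algorithm_scripts | leetcode/LC_32_Longest_Valid_Parentheses_ETL_solution.py | _valid_string_length
-- ===== SOURCE A (Python) =====
-- def _valid_string_length(s):
--     stack = []
--     valid_end = 0
--     for i, char in enumerate(s):
--         if char == '(':
--             stack.append(')')
--         if char == ')':
--             if len(stack) > 0:
--                 stack.pop()
--             else:
--                 return valid_end
--         if len(stack) == 0:
--             valid_end = i + 1
--     return  valid_end
-- ===== SOURCE B (Python) =====
-- def _valid_string_length(s):
--     bal = []
--     b = 0
--     for ch in s:
--         b += (ch == '(') - (ch == ')')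
--         bal.append(b)
--     cut = next((i for i, v in enumerate(bal) if v < 0), len(bal))
--     for i in range(cut - 1, -1, -1):
--         if bal[i] == 0:
--             return i + 1
--     return 0
-- ===== Notes on version B (the rewrite author's own statement) =====
-- stated objective: alternative
-- what changed: Replaces the single-pass stack-and-early-return loop by a two-pass scheme: first build the running-balance array, cut it at the first negative balance, then scan back-to-front for the last zero balance.
import Mathlib
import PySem

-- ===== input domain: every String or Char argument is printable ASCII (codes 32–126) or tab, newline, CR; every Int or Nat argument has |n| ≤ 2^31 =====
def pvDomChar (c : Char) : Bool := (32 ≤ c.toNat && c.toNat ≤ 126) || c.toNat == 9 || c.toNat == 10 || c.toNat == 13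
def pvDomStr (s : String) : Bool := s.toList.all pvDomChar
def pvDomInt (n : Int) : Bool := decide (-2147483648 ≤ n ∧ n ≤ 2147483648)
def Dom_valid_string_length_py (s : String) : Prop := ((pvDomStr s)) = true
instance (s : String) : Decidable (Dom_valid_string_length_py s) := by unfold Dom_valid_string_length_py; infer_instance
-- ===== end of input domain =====

-- B replaces A's single-pass stack loop by two passes over a running-balance array (alternative decomposition, same cost).

-- ===== PORT A =====
-- A's loop: push ')' on '(', pop or early-return on ')', record i+1 whenever the stack empties.
def validGo : List Char → Nat → List Char → Int → Int
  | [], _, _, ve => ve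
  | c :: rest, i, stack, ve =>
    let stack1 := if c = '(' then stack ++ [')'] else stack
    if c = ')' then
      if stack1.length > 0 then
        let stack2 := stack1.dropLast
        validGo rest (i + 1) stack2 (if stack2.length = 0 then (i : Int) + 1 else ve)
      else ve
    else
      validGo rest (i + 1) stack1 (if stack1.length = 0 then (i : Int) + 1 else ve)

def valid_string_length_py (s : String) : Int := validGo s.toList 0 [] 0

-- ===== PORT B =====
-- running-balance list: each element is the balance after the corresponding character
def altBal : List Char → Int → List Int
  | [], _ => []
  | c :: rest, b =>
    let b' := b + (if c = '(' then 1 else 0) - (if c = ')' then 1 else 0)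
    b' :: altBal rest b'

-- cut = first index whose balance is negative, else the length (Source B's next(..., len(bal)))
def cutOf (bal : List Int) : Nat :=
  match bal.findIdx? (fun v => v < 0) with
  | some i => i
  | none => bal.length

-- Source B's backwards for-loop: for i in range(cut-1, -1, -1): if bal[i] == 0: return i+1
def altBack (bal : List Int) : Nat → Int
  | 0 => 0
  | n + 1 => if bal[n]? = some 0 then (n : Int) + 1 else altBack bal n

def valid_string_length_py_alt (s : String) : Int :=
  let bal := altBal s.toList 0
  altBack bal (cutOf bal)

-- ===== PRECONDITION & SPEC =====
def Spec_valid_string_length_py (s : String) (out : Int) : Prop := out = valid_string_length_py_alt s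
instance (s : String) (out : Int) : Decidable (Spec_valid_string_length_py s out) := by unfold Spec_valid_string_length_py; infer_instance

-- ===== CLAIM (what is proved, stated in full; the proofs are below) =====
def Claim_equal_valid_string_length_py : Prop := ∀ (s : String), Dom_valid_string_length_py s → Spec_valid_string_length_py s (valid_string_length_py s)

-- ===== LEMMAS AND PROOFS =====

-- A's loop with the stack abstracted to its length
def absLoop : List Char → Nat → Nat → Int → Int
  | [], _, _, ve => ve
  | c :: rest, i, b, ve =>
    if c = ')' then
      if b > 0 then
        absLoop rest (i + 1) (b - 1) (if b - 1 = 0 then (i : Int) + 1 else ve)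
      else ve
    else
      let b' := if c = '(' then b + 1 else b
      absLoop rest (i + 1) b' (if b' = 0 then (i : Int) + 1 else ve)

theorem validGo_abs : ∀ (cs : List Char) (i : Nat) (stack : List Char) (ve : Int),
    validGo cs i stack ve = absLoop cs i stack.length ve := by
  intro cs
  induction cs with
  | nil => intro i stack ve; rfl
  | cons c rest ih =>
    intro i stack ve
    simp only [validGo, absLoop]
    by_cases hc : c = ')'
    · subst hc
      simp only [if_neg (by decide : ¬ (')' = '('))]
      by_cases hl : stack.length > 0
      · rw [if_pos hl, if_pos hl, ih]
        simp [List.length_dropLast]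
      · simp [hl]
    · rw [if_neg hc, if_neg hc, ih]
      by_cases ho : c = '('
      · simp [ho]
      · simp [ho]

theorem altBack_nonneg : ∀ (bal : List Int) (n : Nat), 0 ≤ altBack bal n := by
  intro bal n
  induction n with
  | zero => simp [altBack]
  | succ n ih =>
    simp only [altBack]
    split
    · positivity
    · exact ih

theorem altBack_shift : ∀ (v : Int) (rest : List Int) (n : Nat),
    altBack (v :: rest) (n + 1) =
      (if altBack rest n = 0 then (if v = 0 then (1 : Int) else 0) else altBack rest n + 1) := by
  intro v rest n
  induction n with
  | zero => simp [altBack]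
  | succ n ih =>
    have hcons : altBack (v :: rest) (n + 2) =
        (if (v :: rest)[n + 1]? = some 0 then ((n : Int) + 1) + 1 else altBack (v :: rest) (n + 1)) := rfl
    have hidx : (v :: rest)[n + 1]? = rest[n]? := rfl
    rw [hcons, hidx, ih]
    by_cases hz : rest[n]? = some 0
    · have : altBack rest (n + 1) = (n : Int) + 1 := by simp [altBack, hz]
      rw [if_pos hz, this]
      have : ((n : Int) + 1) ≠ 0 := by positivity
      rw [if_neg this]
    · have : altBack rest (n + 1) = altBack rest n := by simp [altBack, hz]
      rw [if_neg hz, this]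

theorem cutOf_cons (v : Int) (rest : List Int) :
    cutOf (v :: rest) = if v < 0 then 0 else cutOf rest + 1 := by
  simp only [cutOf, List.findIdx?_cons]
  by_cases hv : v < 0
  · simp [hv]
  · simp only [decide_eq_true_eq, if_neg hv]
    cases h : rest.findIdx? (fun x => decide (x < 0)) with
    | none => simp
    | some j => simp

-- main invariant: A's abstract loop equals B's two-pass computation, for any start state
theorem main_inv : ∀ (cs : List Char) (b : Nat) (i : Nat) (ve : Int),
    absLoop cs i b ve =
      (let bal := altBal cs (b : Int)
       let r := altBack bal (cutOf bal)
       if r = 0 then ve else (i : Int) + r) := by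
  intro cs
  induction cs with
  | nil => intro b i ve; simp [absLoop, altBal, cutOf, altBack, List.findIdx?, List.findIdx?.go]
  | cons c rest ih =>
    intro b i ve
    simp only [absLoop, altBal]
    set b1 : Int := (b : Int) + (if c = '(' then 1 else 0) - (if c = ')' then 1 else 0) with hb1
    by_cases hc : c = ')'
    · subst hc
      have hb1v : b1 = (b : Int) - 1 := by simp [hb1]
      by_cases hb : b > 0
      · -- balance stays nonnegative
        have hneg : ¬ b1 < 0 := by omega
        rw [if_pos rfl, if_pos hb, ih]
        simp only [cutOf_cons, if_neg hneg, altBack_shift]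
        have hcast : ((b - 1 : Nat) : Int) = b1 := by omega
        rw [hcast]
        set r' := altBack (altBal rest b1) (cutOf (altBal rest b1)) with hr'
        have hr'nn : 0 ≤ r' := altBack_nonneg _ _
        by_cases hz : r' = 0
        · rw [if_pos hz, if_pos hz]
          by_cases hb0 : b1 = 0
          · rw [if_pos hb0, if_pos (by omega : b - 1 = 0)]
            have : ¬ (1 : Int) = 0 := by norm_num
            rw [if_neg this]
            try omega
          · rw [if_neg hb0, if_neg (by omega : ¬ b - 1 = 0), if_pos rfl]
        · rw [if_neg hz, if_neg hz, if_neg (by omega : ¬ r' + 1 = 0)]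
          try omega
      · -- unmatched ')': early return; bal head is negative, cut = 0
        have hneg : b1 < 0 := by omega
        rw [if_pos rfl, if_neg hb]
        simp [cutOf_cons, if_pos hneg, altBack]
    · -- not ')': push or skip, balance b' ≥ 0
      rw [if_neg hc]
      set b' : Nat := if c = '(' then b + 1 else b with hb'
      have hcast : (b' : Int) = b1 := by
        by_cases ho : c = '('
        · simp [hb', hb1, ho]
        · simp [hb', hb1, ho, hc]
      have hneg : ¬ b1 < 0 := by omega
      rw [ih]
      simp only [cutOf_cons, if_neg hneg, altBack_shift]
      rw [hcast]
      set r' := altBack (altBal rest b1) (cutOf (altBal rest b1)) with hr'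
      have hr'nn : 0 ≤ r' := altBack_nonneg _ _
      by_cases hz : r' = 0
      · rw [if_pos hz, if_pos hz]
        by_cases hb0 : b1 = 0
        · rw [if_pos hb0, if_pos (by omega : b' = 0)]
          have : ¬ (1 : Int) = 0 := by norm_num
          rw [if_neg this]
          try omega
        · rw [if_neg hb0, if_neg (by omega : ¬ b' = 0), if_pos rfl]
      · rw [if_neg hz, if_neg hz, if_neg (by omega : ¬ r' + 1 = 0)]
        try omega

-- ===== VERDICT (by name: the statement is the Claim_ definition above) =====
theorem valid_string_length_py_spec : Claim_equal_valid_string_length_py := by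
  intro s _
  unfold Spec_valid_string_length_py valid_string_length_py valid_string_length_py_alt
  rw [validGo_abs, List.length_nil, main_inv]
  simp only [Nat.cast_zero, zero_add]
  split <;> simp_all
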